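-- pv_equiv track=rewrite | github.com/Subuday/AdventCode2023 | day6/day6.py | bs_l
-- ===== SOURCE A (Python) =====
-- def bs_l(lo, hi, r):
--     t = hi
--     while lo < hi:
--         h = lo + (hi - lo) // 2
--         d = (t - h) * h
--         if d > r:
--             hi = h
--         else:
--             lo = h + 1
--
--     return lo
-- ===== SOURCE B (Python) =====
-- def bs_l(lo, hi, r):
--     # Recursive search over (base, n) where n is the non-negative LENGTH of the
--     # remaining interval [base, base+n); the record endpoint hi is closed over.
--     def go(base, n):
--         if n == 0:
--             return base
--         k = n // 2
--         h = base + k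
--         if (hi - h) * h <= r:
--             return go(h + 1, n - k - 1)
--         return go(base, k)
--
--     return go(lo, max(hi - lo, 0))
-- ===== Notes on version B (the rewrite author's own statement) =====
-- stated objective: alternative
-- what changed: Replaces A's while-loop over two mutable endpoints (lo, hi) with a recursion over a different state representation: a base offset plus the non-negative remaining interval LENGTH n, which is halved (k = n//2, then n becomes k or n-k-1) each step, with the record endpoint closed over and the branch test inverted.
import Mathlib
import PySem

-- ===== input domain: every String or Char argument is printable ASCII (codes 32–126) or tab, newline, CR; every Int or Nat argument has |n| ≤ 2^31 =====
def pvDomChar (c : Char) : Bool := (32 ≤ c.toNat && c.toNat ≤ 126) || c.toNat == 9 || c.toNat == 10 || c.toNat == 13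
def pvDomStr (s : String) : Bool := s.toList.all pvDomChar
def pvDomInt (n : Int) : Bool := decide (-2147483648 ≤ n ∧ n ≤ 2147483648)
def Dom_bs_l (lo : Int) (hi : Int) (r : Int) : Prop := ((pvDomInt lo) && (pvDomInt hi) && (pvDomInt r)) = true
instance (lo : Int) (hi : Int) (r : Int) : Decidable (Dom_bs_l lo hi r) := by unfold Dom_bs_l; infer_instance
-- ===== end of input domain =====

-- B re-decomposes A's two-endpoint while-loop as a well-founded recursion over
-- (base, n) where n is the natural-number LENGTH of the remaining interval,
-- halving n each step; same results, same cost (objective: alternative decomposition).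

-- ===== PORT A =====
-- A's while-loop over mutable endpoints (lo, hi); t is the original hi.
-- The structural fuel counter (= initial interval size) is purely a totality guard:
-- the interval shrinks every iteration, so the fuel never runs out and the port
-- computes exactly what the Python loop computes.
def bsLoopA (fuel : Nat) (t lo hi r : Int) : Int :=
  match fuel with
  | 0 => lo
  | fuel + 1 =>
    if lo < hi then
      let h := lo + PySem.Int.floordiv (hi - lo) 2
      let d := (t - h) * h
      if d > r then bsLoopA fuel t lo h r else bsLoopA fuel t (h + 1) hi r
    else lo

def bs_l (lo : Int) (hi : Int) (r : Int) : Int := bsLoopA (hi - lo).toNat hi lo hi r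

-- ===== PORT B =====
-- B's inner recursive go over the remaining length n : Nat (t, r closed over);
-- terminates because both recursive calls strictly shrink n.
def bsGoB (t r : Int) (base : Int) (n : Nat) : Int :=
  if hn : n = 0 then base
  else
    let k := n / 2
    let h := base + (k : Int)
    if (t - h) * h ≤ r then bsGoB t r (h + 1) (n - k - 1)
    else bsGoB t r base k
termination_by n
decreasing_by all_goals omega

def bs_l_alt (lo : Int) (hi : Int) (r : Int) : Int :=
  bsGoB hi r lo (max (hi - lo) 0).toNat

-- ===== PRECONDITION & SPEC =====
def Spec_bs_l (lo : Int) (hi : Int) (r : Int) (out : Int) : Prop := out = bs_l_alt lo hi r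
instance (lo : Int) (hi : Int) (r : Int) (out : Int) : Decidable (Spec_bs_l lo hi r out) := by unfold Spec_bs_l; infer_instance

-- ===== CLAIM (what is proved, stated in full; the proofs are below) =====
def Claim_equal_bs_l : Prop := ∀ (lo : Int) (hi : Int) (r : Int), Dom_bs_l lo hi r → Spec_bs_l lo hi r (bs_l lo hi r)

-- ===== LEMMAS AND PROOFS =====

-- A's loop with enough fuel equals B's recursion on the interval length.
theorem pv_loop_eq_go (fuel : Nat) (t r : Int) :
    ∀ (base hi : Int), (hi - base).toNat ≤ fuel →
      bsLoopA fuel t base hi r = bsGoB t r base (hi - base).toNat := by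
  induction fuel with
  | zero =>
      intro base hi hle
      have h0 : (hi - base).toNat = 0 := Nat.le_zero.mp hle
      rw [bsLoopA, h0, bsGoB]
      simp
  | succ fuel ih =>
      intro base hi hle
      rw [bsLoopA, bsGoB]
      by_cases hlt : base < hi
      · set n : Nat := (hi - base).toNat with hn
        have hnpos : n ≠ 0 := by omega
        have hfd : PySem.Int.floordiv (hi - base) 2 = ((n / 2 : Nat) : Int) := by
          rw [PySem.Int.floordiv_eq_ediv_of_pos (by norm_num)]
          omega
        simp only [if_pos hlt, dif_neg hnpos, hfd]
        by_cases hd : (t - (base + ((n / 2 : Nat) : Int))) * (base + ((n / 2 : Nat) : Int)) > r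
        · rw [if_pos hd, if_neg (by omega)]
          have := ih base (base + ((n / 2 : Nat) : Int)) (by omega)
          rw [this]
          congr 1
          omega
        · rw [if_neg hd, if_pos (by omega)]
          have := ih (base + ((n / 2 : Nat) : Int) + 1) hi (by omega)
          rw [this]
          congr 1
          omega
      · have h0 : (hi - base).toNat = 0 := by omega
        rw [if_neg hlt]
        simp [h0]

-- ===== VERDICT (by name: the statement is the Claim_ definition above) =====
theorem bs_l_spec : Claim_equal_bs_l := by
  intro lo hi r _
  unfold Spec_bs_l bs_l bs_l_alt
  have hmax : (max (hi - lo) 0).toNat = (hi - lo).toNat := by omega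
  rw [hmax]
  exact pv_loop_eq_go (hi - lo).toNat hi r lo hi le_rfl
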